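-- pv_equiv track=rewrite | github.com/ldjx7/hermes-acp-client-plugin | acp/worker_manager.py | is_rate_limit_error
-- ===== SOURCE A (Python) =====
-- def is_rate_limit_error(error_message: str) -> bool:
--     """
--     判断是否为速率限制错误
--
--     常见速率限制错误:
--     - 429 Too Many Requests
--     - Rate limit exceeded
--     - Quota exceeded
--     - Resource exhausted
--     """
--     error_lower = error_message.lower()
--     rate_limit_indicators = [
--         "rate limit",
--         "too many requests",
--         "quota exceeded",
--         "resource exhausted",
--         "429",
--         "throttl",
--     ]
--
--     return any(indicator in error_lower for indicator in rate_limit_indicators)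
-- ===== SOURCE B (Python) =====
-- _KEYWORDS = (
--     "rate limit",
--     "too many requests",
--     "quota exceeded",
--     "resource exhausted",
--     "429",
--     "throttl",
-- )
--
--
-- def is_rate_limit_error(error_message: str) -> bool:
--     # Single left-to-right scan: at each position of the lowercased message,
--     # test whether any keyword starts there.
--     s = error_message.lower()
--     for i in range(len(s)):
--         for kw in _KEYWORDS:
--             if s.startswith(kw, i):
--                 return True
--     return False
-- ===== Notes on version B (the rewrite author's own statement) =====
-- stated objective: alternative
-- what changed: B replaces six independent substring searches over the lowercased message with a single left-to-right scan that at each position tests whether any keyword starts there.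
import Mathlib
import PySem

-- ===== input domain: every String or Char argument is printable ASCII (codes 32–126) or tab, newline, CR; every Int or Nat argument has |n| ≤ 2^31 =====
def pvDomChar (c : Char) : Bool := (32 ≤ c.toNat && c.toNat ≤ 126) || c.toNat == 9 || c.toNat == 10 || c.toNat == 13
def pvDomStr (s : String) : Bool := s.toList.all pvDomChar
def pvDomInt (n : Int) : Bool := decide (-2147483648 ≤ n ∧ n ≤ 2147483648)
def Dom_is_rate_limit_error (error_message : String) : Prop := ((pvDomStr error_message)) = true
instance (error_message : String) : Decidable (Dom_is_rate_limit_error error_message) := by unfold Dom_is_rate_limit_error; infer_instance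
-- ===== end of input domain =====

-- B replaces the six independent substring searches with one left-to-right scan
-- testing each keyword as a prefix at every position (alternative decomposition, same cost).

-- ===== PORT A =====
def is_rate_limit_error (error_message : String) : Bool :=
  let error_lower := PySem.Str.lower error_message
  let rate_limit_indicators : List String :=
    ["rate limit", "too many requests", "quota exceeded", "resource exhausted", "429", "throttl"]
  rate_limit_indicators.any (fun indicator => PySem.Str.isIn indicator error_lower)

-- ===== PORT B =====
def rlKeywords : List (List Char) :=
  ["rate limit".toList, "too many requests".toList, "quota exceeded".toList,
   "resource exhausted".toList, "429".toList, "throttl".toList]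

def rlScan : List Char → Bool
  | [] => false
  | c :: rest => rlKeywords.any (fun k => k.isPrefixOf (c :: rest)) || rlScan rest

def is_rate_limit_error_alt (error_message : String) : Bool :=
  rlScan (PySem.Str.lower error_message).toList

-- ===== PRECONDITION & SPEC =====
def Spec_is_rate_limit_error (error_message : String) (out : Bool) : Prop := out = is_rate_limit_error_alt error_message
instance (error_message : String) (out : Bool) : Decidable (Spec_is_rate_limit_error error_message out) := by unfold Spec_is_rate_limit_error; infer_instance

-- ===== CLAIM (what is proved, stated in full; the proofs are below) =====
def Claim_equal_is_rate_limit_error : Prop := ∀ (error_message : String), Dom_is_rate_limit_error error_message → Spec_is_rate_limit_error error_message (is_rate_limit_error error_message)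

-- ===== LEMMAS AND PROOFS =====

theorem rlScan_iff (s : List Char) :
    rlScan s = true ↔ ∃ k ∈ rlKeywords, k <:+: s := by
  induction s with
  | nil =>
    simp only [rlScan, List.infix_nil]
    decide
  | cons c rest ih =>
    simp only [rlScan, Bool.or_eq_true, ih, List.any_eq_true,
      List.isPrefixOf_iff_prefix, List.infix_cons_iff]
    constructor
    · rintro (⟨k, hk, h⟩ | ⟨k, hk, h⟩)
      · exact ⟨k, hk, Or.inl h⟩
      · exact ⟨k, hk, Or.inr h⟩
    · rintro ⟨k, hk, h | h⟩
      · exact Or.inl ⟨k, hk, h⟩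
      · exact Or.inr ⟨k, hk, h⟩

-- ===== VERDICT (by name: the statement is the Claim_ definition above) =====
theorem is_rate_limit_error_spec : Claim_equal_is_rate_limit_error := by
  intro m _
  unfold Spec_is_rate_limit_error is_rate_limit_error is_rate_limit_error_alt
  rw [Bool.eq_iff_iff, rlScan_iff]
  simp only [List.any_eq_true, PySem.Str.isIn_iff_infix, rlKeywords]
  constructor
  · rintro ⟨ind, hind, h⟩
    refine ⟨ind.toList, ?_, h⟩
    fin_cases hind <;> simp
  · rintro ⟨k, hk, h⟩
    fin_cases hk <;>
      first
      | exact ⟨"rate limit", by simp, h⟩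
      | exact ⟨"too many requests", by simp, h⟩
      | exact ⟨"quota exceeded", by simp, h⟩
      | exact ⟨"resource exhausted", by simp, h⟩
      | exact ⟨"429", by simp, h⟩
      | exact ⟨"throttl", by simp, h⟩
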